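-- pv_equiv track=rewrite | github.com/jebin2/CaptionCreator | riddle_parser.py | add_markers_to_transcript
-- ===== SOURCE A (Python) =====
-- def insert_text(original_string, text_to_insert, index):
--     if index == -1:
--         return original_string
--     index = max(0, min(int(index), len(original_string)))
--     return original_string[:index] + text_to_insert + original_string[index:]
--
-- def add_markers_to_transcript(transcript, positions):
--     marked_transcript = transcript
--     markers = [
--         ("start", "--#start#--"),
--         ("answer", "--#answer#--"),
--         ("end", "--#end#--")
--     ]
--
--     sorted_markers = sorted(
--         [(key, marker) for key, marker in markers if positions.get(key, -1) != -1],
--         key=lambda x: positions[x[0]],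
--         reverse=True
--     )
--
--     for key, marker in sorted_markers:
--         position = positions[key]
--         marked_transcript = insert_text(marked_transcript, marker, position)
--
--     return marked_transcript
-- ===== SOURCE B (Python) =====
-- def add_markers_to_transcript(transcript, positions):
--     L = len(transcript)
--     markers = [
--         ("start", "--#start#--"),
--         ("answer", "--#answer#--"),
--         ("end", "--#end#--")
--     ]
--     # active markers, listed in reverse marker order so that a stable sort by
--     # position puts later markers first among equal positions
--     items = [(positions[key], marker)
--              for key, marker in reversed(markers)
--              if positions.get(key, -1) != -1]
--     items.sort(key=lambda t: t[0])
--     parts = []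
--     prev = 0
--     for p, marker in items:
--         cut = max(0, min(int(p), L))
--         parts.append(transcript[prev:cut])
--         parts.append(marker)
--         prev = cut
--     parts.append(transcript[prev:])
--     return "".join(parts)
-- ===== Notes on version B (the rewrite author's own statement) =====
-- stated objective: simpler
-- what changed: B replaces A's reverse-sorted repeated in-place string insertion (re-slicing the growing string once per marker) by one ascending sweep over the sorted cut points that emits transcript segments and markers into a list joined once at the end.
-- intended difference: When two or more of the keys start/answer/end carry positions strictly greater than len(transcript), A clamps each later marker against the already-grown string and so drops it inside or after a previously inserted marker (even splitting that marker in two, e.g. 'ab---#start#---#answer#--'); B clamps every position against the original transcript and appends the markers at the end in position order ('ab--#start#----#answer#--'), which is the intended behaviour of inserting markers at transcript positions. — e.g. on add_markers_to_transcript("ab", [("start", 3), ("answer", 4)]): A returns "ab---#start#---#answer#--", B returns "ab--#start#----#answer#--"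
import Mathlib
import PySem

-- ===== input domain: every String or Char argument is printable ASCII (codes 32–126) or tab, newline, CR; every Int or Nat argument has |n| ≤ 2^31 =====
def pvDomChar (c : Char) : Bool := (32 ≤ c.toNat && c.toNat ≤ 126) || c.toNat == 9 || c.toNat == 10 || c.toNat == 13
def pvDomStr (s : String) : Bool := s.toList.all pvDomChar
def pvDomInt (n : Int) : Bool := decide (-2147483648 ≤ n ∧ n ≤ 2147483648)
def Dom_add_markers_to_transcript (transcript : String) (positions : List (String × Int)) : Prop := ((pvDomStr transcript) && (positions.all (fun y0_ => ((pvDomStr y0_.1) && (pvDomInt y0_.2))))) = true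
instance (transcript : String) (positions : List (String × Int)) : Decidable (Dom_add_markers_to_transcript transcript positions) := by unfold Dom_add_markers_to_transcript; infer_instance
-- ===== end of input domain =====

-- B builds the result in one ascending sweep over the sorted cut points (segment concatenation,
-- joined once) instead of A's descending repeated in-place insertion; where two or more positions
-- exceed len(transcript) the programs differ and B's value is the intended one (see D_ below).

-- ===== PORT A =====
def insert_text (original_string : String) (text_to_insert : String) (index : Int) : String :=
  if index = -1 then original_string
  else
    -- index = max(0, min(int(index), len(original_string))); s[:index] + text + s[index:]
    let index := max 0 (min index (PySem.Str.len original_string))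
    String.ofList (PySem.List.slice original_string.toList none (some index)
      ++ text_to_insert.toList
      ++ PySem.List.slice original_string.toList (some index) none)

def add_markers_to_transcript (transcript : String) (positions : List (String × Int)) : String :=
  let marked_transcript := transcript
  let pos := PySem.Dict.mk positions
  let markers : List (String × String) :=
    [("start", "--#start#--"), ("answer", "--#answer#--"), ("end", "--#end#--")]
  let sorted_markers :=
    PySem.List.sorted (markers.filter (fun km => PySem.Dict.getD pos km.1 (-1) != -1))
      (fun x => PySem.Dict.getD pos x.1 (-1)) true
  sorted_markers.foldl
    (fun marked km => insert_text marked km.2 (PySem.Dict.getD pos km.1 (-1)))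
    marked_transcript

-- ===== PORT B =====
def add_markers_to_transcript_alt (transcript : String) (positions : List (String × Int)) : String :=
  let L := PySem.Str.len transcript
  let pos := PySem.Dict.mk positions
  let markers : List (String × String) :=
    [("start", "--#start#--"), ("answer", "--#answer#--"), ("end", "--#end#--")]
  -- active (position, marker) pairs from reversed(markers), stable-sorted by position
  let items : List (Int × String) :=
    (markers.reverse.filter (fun km => PySem.Dict.getD pos km.1 (-1) != -1)).map
      (fun km => (PySem.Dict.getD pos km.1 (-1), km.2))
  let sorted_items := PySem.List.sorted items (fun t => t.1) false
  -- one pass: state (prev, parts); emit transcript[prev:cut] and the marker; suffix; join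
  let st := sorted_items.foldl
    (fun (st : Int × List (List Char)) pm =>
      let cut := max 0 (min pm.1 L)
      (cut, st.2 ++ [PySem.List.slice transcript.toList (some st.1) (some cut), pm.2.toList]))
    ((0 : Int), ([] : List (List Char)))
  String.ofList (PySem.Chars.join []
    (st.2 ++ [PySem.List.slice transcript.toList (some st.1) none]))

-- ===== PRECONDITION & SPEC =====
-- When two or more of the keys start/answer/end carry positions strictly greater than
-- len(transcript), A clamps each later marker against the already-grown string and so inserts it
-- inside or after a previously inserted marker (it can split a marker in two); B clamps every
-- position against the original transcript and appends those markers at the end in position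
-- order, which is the intended behaviour of inserting markers at transcript positions.
def D_add_markers_to_transcript (transcript : String) (positions : List (String × Int)) : Prop :=
  2 ≤ ((["start", "answer", "end"] : List String).filter
        (fun k => decide (PySem.Str.len transcript
                            < PySem.Dict.getD (PySem.Dict.mk positions) k (-1)))).length
instance (transcript : String) (positions : List (String × Int)) : Decidable (D_add_markers_to_transcript transcript positions) := by unfold D_add_markers_to_transcript; infer_instance

def Spec_add_markers_to_transcript (transcript : String) (positions : List (String × Int)) (out : String) : Prop := ¬ D_add_markers_to_transcript transcript positions → out = add_markers_to_transcript_alt transcript positions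
instance (transcript : String) (positions : List (String × Int)) (out : String) : Decidable (Spec_add_markers_to_transcript transcript positions out) := by unfold Spec_add_markers_to_transcript; infer_instance

def pvDiffWitness_add_markers_to_transcript : String × (List (String × Int)) :=
  ("ab", [("start", 3), ("answer", 4)])
def pvDiffWitnessOut_add_markers_to_transcript : String × String :=
  ("ab---#start#---#answer#--", "ab--#start#----#answer#--")

-- ===== CLAIM (what is proved, stated in full; the proofs are below) =====
def Claim_unchanged_add_markers_to_transcript : Prop := ∀ (transcript : String) (positions : List (String × Int)), Dom_add_markers_to_transcript transcript positions → Spec_add_markers_to_transcript transcript positions (add_markers_to_transcript transcript positions)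
def Claim_changed_add_markers_to_transcript : Prop := Dom_add_markers_to_transcript (pvDiffWitness_add_markers_to_transcript.1) (pvDiffWitness_add_markers_to_transcript.2) ∧ D_add_markers_to_transcript (pvDiffWitness_add_markers_to_transcript.1) (pvDiffWitness_add_markers_to_transcript.2) ∧ add_markers_to_transcript (pvDiffWitness_add_markers_to_transcript.1) (pvDiffWitness_add_markers_to_transcript.2) = pvDiffWitnessOut_add_markers_to_transcript.1 ∧ add_markers_to_transcript_alt (pvDiffWitness_add_markers_to_transcript.1) (pvDiffWitness_add_markers_to_transcript.2) = pvDiffWitnessOut_add_markers_to_transcript.2 ∧ pvDiffWitnessOut_add_markers_to_transcript.1 ≠ pvDiffWitnessOut_add_markers_to_transcript.2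

def Claim_exact_add_markers_to_transcript : Prop := ∀ (transcript : String) (positions : List (String × Int)), Dom_add_markers_to_transcript transcript positions → D_add_markers_to_transcript transcript positions → add_markers_to_transcript transcript positions ≠ add_markers_to_transcript_alt transcript positions

-- ===== LEMMAS AND PROOFS =====

/-- Python's clamp `max(0, min(p, n))` as a natural number. -/
def clampN (n : Nat) (p : Int) : Nat := (max 0 (min p (n : Int))).toNat

/-- One in-place insertion (A's step), on lists of characters. -/
def insA (l : List Char) (pm : Int × List Char) : List Char :=
  l.take (clampN l.length pm.1) ++ pm.2 ++ l.drop (clampN l.length pm.1)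

/-- B's segment construction: ascending cut points, clamped against the ORIGINAL list `l`. -/
def segB (l : List Char) : Nat → List (Int × List Char) → List Char
  | prev, [] => l.drop prev
  | prev, pm :: rest =>
      (l.take (clampN l.length pm.1)).drop prev ++ pm.2
        ++ segB l (clampN l.length pm.1) rest

/-- A's algorithm, normalised to the three looked-up positions. -/
def normA (l : List Char) (vs va ve : Int) : List Char :=
  (PySem.List.sorted
    (([(vs, "--#start#--".toList), (va, "--#answer#--".toList), (ve, "--#end#--".toList)]
       : List (Int × List Char)).filter (fun pm => pm.1 != -1))
    (fun pm => pm.1) true).foldl insA l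

/-- B's algorithm, normalised to the three looked-up positions. -/
def normB (l : List Char) (vs va ve : Int) : List Char :=
  segB l 0 (PySem.List.sorted
    (([(ve, "--#end#--".toList), (va, "--#answer#--".toList), (vs, "--#start#--".toList)]
       : List (Int × List Char)).filter (fun pm => pm.1 != -1))
    (fun pm => pm.1) false)

theorem length_insA (l : List Char) (pm : Int × List Char) :
    (insA l pm).length = l.length + pm.2.length := by
  have h : clampN l.length pm.1 ≤ l.length := by unfold clampN; omega
  simp [insA]; omega

theorem foldl_insA_append (items : List (Int × List Char)) :
    ∀ (x y : List Char), (∀ pm ∈ items, pm.1 ≤ (x.length : Int)) →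
    List.foldl insA (x ++ y) items = List.foldl insA x items ++ y := by
  induction items with
  | nil => intro x y _; simp
  | cons pm rest ih =>
    intro x y h
    have hpm : pm.1 ≤ (x.length : Int) := h pm (by simp)
    have hc : clampN (x.length + y.length) pm.1 = clampN x.length pm.1 := by
      simp only [clampN]; omega
    have hle : clampN x.length pm.1 ≤ x.length := by unfold clampN; omega
    have key : insA (x ++ y) pm = insA x pm ++ y := by
      unfold insA
      rw [show (x ++ y).length = x.length + y.length from List.length_append, hc,
        List.take_append_of_le_length hle, List.drop_append_of_le_length hle]
      simp [List.append_assoc]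
    rw [List.foldl_cons, key, List.foldl_cons, ih (insA x pm) y]
    intro q hq
    have h1 := h q (by simp [hq])
    have h2 := length_insA x pm
    omega

theorem segB_append (l : List Char) (ca : Nat) (hca : ca ≤ l.length) (p : Int) (m : List Char)
    (hpa : clampN l.length p = ca) :
    ∀ (items : List (Int × List Char)) (prev : Nat),
      (∀ pm ∈ items, clampN l.length pm.1 ≤ ca) →
      segB (l.take ca) prev items ++ m ++ l.drop ca = segB l prev (items ++ [(p, m)]) := by
  intro items
  induction items with
  | nil => intro prev _; simp [segB, hpa]
  | cons pm rest ih =>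
    intro prev h
    have h1 : clampN l.length pm.1 ≤ ca := h pm (by simp)
    have hcl : clampN (l.take ca).length pm.1 = clampN l.length pm.1 := by
      have h1' := h1
      simp only [clampN, List.length_take] at h1' ⊢
      omega
    have htt : (l.take ca).take (clampN l.length pm.1) = l.take (clampN l.length pm.1) := by
      rw [List.take_take]; congr 1; omega
    simp only [segB, List.cons_append, hcl, htt, List.append_assoc]
    have hih := ih (clampN l.length pm.1) (fun q hq => h q (by simp [hq]))
    congr 2
    simpa [List.append_assoc] using hih

theorem foldl_insA_rev_all_le (items : List (Int × List Char)) :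
    ∀ (l : List Char), items.Pairwise (fun a b => a.1 ≤ b.1) →
    (∀ pm ∈ items, pm.1 ≤ (l.length : Int)) →
    List.foldl insA l items.reverse = segB l 0 items := by
  induction items using List.reverseRecOn with
  | nil => intro l _ _; simp [segB]
  | append_singleton init a ih =>
    intro l hp hle
    rw [List.pairwise_append] at hp
    obtain ⟨hinit, -, hcross⟩ := hp
    have ha_le : a.1 ≤ (l.length : Int) := hle a (by simp)
    have hca_le : clampN l.length a.1 ≤ l.length := by unfold clampN; omega
    have hlen_take : (l.take (clampN l.length a.1)).length = clampN l.length a.1 := by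
      rw [List.length_take]; omega
    have hinit_le : ∀ pm ∈ init, pm.1 ≤ ((l.take (clampN l.length a.1)).length : Int) := by
      intro pm hpm
      have h1 : pm.1 ≤ a.1 := hcross pm hpm a (by simp)
      have h2 : pm.1 ≤ (l.length : Int) := hle pm (by simp [hpm])
      rw [hlen_take]; simp only [clampN]; omega
    have hkey : insA l a
        = l.take (clampN l.length a.1) ++ (a.2 ++ l.drop (clampN l.length a.1)) := by
      simp [insA]
    rw [List.reverse_append, List.reverse_singleton, List.singleton_append, List.foldl_cons,
      hkey,
      foldl_insA_append init.reverse _ _ (by simpa using hinit_le),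
      ih _ hinit hinit_le]
    rw [← segB_append l (clampN l.length a.1) hca_le a.1 a.2 rfl init 0 ?hc]
    · simp [List.append_assoc]
    case hc =>
      intro pm hpm
      have h1 : pm.1 ≤ a.1 := hcross pm hpm a (by simp)
      simp only [clampN]; omega

theorem foldl_insA_rev_main (items : List (Int × List Char)) (l : List Char)
    (hp : items.Pairwise (fun a b => a.1 ≤ b.1))
    (hle : ∀ pm ∈ items.dropLast, pm.1 ≤ (l.length : Int)) :
    List.foldl insA l items.reverse = segB l 0 items := by
  rcases List.eq_nil_or_concat items with rfl | ⟨init, a, rfl⟩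
  · simp [segB]
  · rw [List.concat_eq_append] at hp hle ⊢
    rw [List.dropLast_concat] at hle
    have hp' := hp
    rw [List.pairwise_append] at hp'
    obtain ⟨hinit, -, hcross⟩ := hp'
    by_cases hA : a.1 ≤ (l.length : Int)
    · refine foldl_insA_rev_all_le (init ++ [a]) l hp ?_
      intro pm hpm
      rcases List.mem_append.mp hpm with h | h
      · exact hle pm h
      · simp at h; subst h; exact hA
    · have hcaL : clampN l.length a.1 = l.length := by unfold clampN; omega
      have hkey : insA l a = l ++ a.2 := by
        simp [insA, hcaL]
      rw [List.reverse_append, List.reverse_singleton, List.singleton_append, List.foldl_cons,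
        hkey, foldl_insA_append init.reverse l a.2 (by simpa using hle),
        foldl_insA_rev_all_le init l hinit hle]
      rw [← segB_append l l.length le_rfl a.1 a.2 hcaL init 0 ?hc]
      · simp
      case hc => intro pm _; unfold clampN; omega

theorem close0' (l : List Char) : l = segB l 0 [] := by simp [segB]

theorem close1' (l : List Char) (p1 : Int) (m1 : List Char) :
    insA l (p1, m1) = segB l 0 [(p1, m1)] := by
  simpa using foldl_insA_rev_main [(p1, m1)] l (by simp) (by simp)

theorem close2' (l : List Char) (p1 p2 : Int) (m1 m2 : List Char)
    (h12 : p1 ≤ p2) (h1 : p1 ≤ (l.length : Int)) :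
    insA (insA l (p2, m2)) (p1, m1) = segB l 0 [(p1, m1), (p2, m2)] := by
  simpa using foldl_insA_rev_main [(p1, m1), (p2, m2)] l (by simp [h12]) (by simpa using h1)

theorem close3' (l : List Char) (p1 p2 p3 : Int) (m1 m2 m3 : List Char)
    (h12 : p1 ≤ p2) (h23 : p2 ≤ p3) (h1 : p1 ≤ (l.length : Int)) (h2 : p2 ≤ (l.length : Int)) :
    insA (insA (insA l (p3, m3)) (p2, m2)) (p1, m1)
      = segB l 0 [(p1, m1), (p2, m2), (p3, m3)] := by
  have := foldl_insA_rev_main [(p1, m1), (p2, m2), (p3, m3)] l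
    (by simp [List.pairwise_cons]; omega) (by simp; omega)
  simpa using this

theorem sort0 (l : List Char) :
    List.foldl insA l (PySem.List.sorted ([] : List (Int × List Char)) (fun pm => pm.1) true)
      = segB l 0 (PySem.List.sorted ([] : List (Int × List Char)) (fun pm => pm.1) false) := by
  simpa [PySem.List.sorted] using close0' l

theorem sort1 (l : List Char) (p : Int) (m : List Char) :
    List.foldl insA l (PySem.List.sorted [(p, m)] (fun pm => pm.1) true)
      = segB l 0 (PySem.List.sorted [(p, m)] (fun pm => pm.1) false) := by
  simpa [PySem.List.sorted, PySem.List.insertBy] using close1' l p m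

theorem sort2 (l : List Char) (p q : Int) (mp mq : List Char)
    (hpq : ¬((l.length : Int) < p ∧ (l.length : Int) < q)) :
    List.foldl insA l (PySem.List.sorted [(p, mp), (q, mq)] (fun pm => pm.1) true)
      = segB l 0 (PySem.List.sorted [(q, mq), (p, mp)] (fun pm => pm.1) false) := by
  by_cases h : p < q
  · simpa [PySem.List.sorted, PySem.List.insertBy, h]
      using close2' l p q mp mq (by omega) (by omega)
  · simpa [PySem.List.sorted, PySem.List.insertBy, h]
      using close2' l q p mq mp (by omega) (by omega)

theorem sort3 (l : List Char) (vs va ve : Int) (ms ma me : List Char)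
    (hsa : ¬((l.length : Int) < vs ∧ (l.length : Int) < va))
    (hse : ¬((l.length : Int) < vs ∧ (l.length : Int) < ve))
    (hae : ¬((l.length : Int) < va ∧ (l.length : Int) < ve)) :
    List.foldl insA l
        (PySem.List.sorted [(vs, ms), (va, ma), (ve, me)] (fun pm => pm.1) true)
      = segB l 0
        (PySem.List.sorted [(ve, me), (va, ma), (vs, ms)] (fun pm => pm.1) false) := by
  by_cases h1 : vs < va <;> by_cases h2 : va < ve <;> by_cases h3 : vs < ve <;>
    simp only [PySem.List.sorted, PySem.List.insertBy, List.foldl_cons, List.foldl_nil,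
      if_true, h1, h2, h3, decide_true, decide_false, Bool.false_eq_true, if_false,
      decide_eq_true_eq, ite_true, ite_false, eq_self_iff_true, not_false_eq_true,
      if_neg, if_pos, reduceIte] <;>
    first
      | omega
      | (apply close3' l <;> omega)

set_option maxHeartbeats 800000 in
theorem coreAB (l : List Char) (vs va ve : Int)
    (hsa : ¬((l.length : Int) < vs ∧ (l.length : Int) < va))
    (hse : ¬((l.length : Int) < vs ∧ (l.length : Int) < ve))
    (hae : ¬((l.length : Int) < va ∧ (l.length : Int) < ve)) :
    normA l vs va ve = normB l vs va ve := by
  unfold normA normB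
  by_cases hs : vs = -1 <;> by_cases ha : va = -1 <;> by_cases he : ve = -1 <;>
    simp only [hs, ha, he, List.filter_cons, List.filter_nil, bne_self_eq_false,
      Bool.false_eq_true, if_false, bne_iff_ne, ne_eq, not_false_eq_true, if_true] <;>
    first
      | exact sort0 l
      | exact sort1 l _ _
      | exact sort2 l _ _ _ _ hsa
      | exact sort2 l _ _ _ _ hse
      | exact sort2 l _ _ _ _ hae
      | exact sort3 l _ _ _ _ _ _ hsa hse hae

theorem joinNil : ∀ ps : List (List Char), PySem.Chars.join [] ps = ps.flatten := by
  intro ps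
  induction ps with
  | nil => simp [PySem.Chars.join_nil]
  | cons a t ih =>
    cases t with
    | nil => simp [PySem.Chars.join_singleton]
    | cons b t2 => rw [PySem.Chars.join_cons_cons]; simp [ih]

theorem insertBy_map {α β : Type} (g : α → β) (bf : β → β → Bool) (x : α) (ys : List α) :
    PySem.List.insertBy bf (g x) (ys.map g)
      = (PySem.List.insertBy (fun a b => bf (g a) (g b)) x ys).map g := by
  induction ys with
  | nil => simp [PySem.List.insertBy]
  | cons y ys ih =>
    by_cases h : bf (g x) (g y) = true <;> simp [PySem.List.insertBy, h, ih]

theorem foldl_insertBy_map {α β : Type} (g : α → β) (bf : β → β → Bool)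
    (xs : List α) : ∀ acc : List α,
    List.foldl (fun acc x => PySem.List.insertBy bf x acc) (acc.map g) (xs.map g)
      = (List.foldl (fun acc x => PySem.List.insertBy (fun a b => bf (g a) (g b)) x acc) acc xs).map g := by
  induction xs with
  | nil => intro acc; simp
  | cons x xs ih =>
    intro acc
    simp only [List.map_cons, List.foldl_cons]
    rw [insertBy_map g bf x acc, ih]

theorem sorted_map {α β κ : Type} [LT κ] [DecidableLT κ] (g : α → β) (key : β → κ)
    (rev : Bool) (xs : List α) :
    PySem.List.sorted (xs.map g) key rev
      = (PySem.List.sorted xs (fun a => key (g a)) rev).map g := by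
  cases rev <;> simpa [PySem.List.sorted] using foldl_insertBy_map g _ xs []

theorem toList_ofList (cs : List Char) : (String.ofList cs).toList = cs := by simp

theorem insert_text_toList (s m : String) (p : Int) (hp : p ≠ -1) :
    (insert_text s m p).toList = insA s.toList (p, m.toList) := by
  unfold insert_text
  rw [if_neg hp]
  have h0 : (0 : Int) ≤ max 0 (min p (PySem.Str.len s)) := le_max_left _ _
  show (String.ofList (PySem.List.slice s.toList none (some (max 0 (min p (PySem.Str.len s))))
      ++ m.toList
      ++ PySem.List.slice s.toList (some (max 0 (min p (PySem.Str.len s)))) none)).toList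
    = insA s.toList (p, m.toList)
  rw [toList_ofList, PySem.List.slice_to _ h0, PySem.List.slice_from _ h0]
  simp [insA, clampN, PySem.Str.len]

theorem foldbridge (pos : PySem.Dict String Int) (LA : List (String × String)) :
    ∀ (s : String), (∀ km ∈ LA, PySem.Dict.getD pos km.1 (-1) ≠ -1) →
    (LA.foldl (fun marked km => insert_text marked km.2 (PySem.Dict.getD pos km.1 (-1))) s).toList
      = LA.foldl (fun acc km => insA acc (PySem.Dict.getD pos km.1 (-1), km.2.toList)) s.toList := by
  induction LA with
  | nil => intro s _; simp
  | cons km rest ih =>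
    intro s h
    simp only [List.foldl_cons]
    rw [← insert_text_toList s km.2 _ (h km (by simp))]
    exact ih _ (fun q hq => h q (by simp [hq]))

/-- The A-side element conversion. -/
def gA (pos : PySem.Dict String Int) (km : String × String) : Int × List Char :=
  (PySem.Dict.getD pos km.1 (-1), km.2.toList)

theorem stepA (t : String) (positions : List (String × Int)) :
    (add_markers_to_transcript t positions).toList
      = normA t.toList (PySem.Dict.getD (PySem.Dict.mk positions) "start" (-1))
          (PySem.Dict.getD (PySem.Dict.mk positions) "answer" (-1))
          (PySem.Dict.getD (PySem.Dict.mk positions) "end" (-1)) := by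
  unfold add_markers_to_transcript
  dsimp only
  rw [foldbridge (PySem.Dict.mk positions) _ t ?hmem]
  case hmem =>
    intro km hkm
    rw [PySem.List.mem_sorted, List.mem_filter] at hkm
    simpa using hkm.2
  unfold normA
  have hfil : (([("start", "--#start#--"), ("answer", "--#answer#--"), ("end", "--#end#--")]
      : List (String × String)).filter
        (fun km => PySem.Dict.getD (PySem.Dict.mk positions) km.1 (-1) != -1)).map
        (gA (PySem.Dict.mk positions))
      = ([(PySem.Dict.getD (PySem.Dict.mk positions) "start" (-1), "--#start#--".toList),
          (PySem.Dict.getD (PySem.Dict.mk positions) "answer" (-1), "--#answer#--".toList),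
          (PySem.Dict.getD (PySem.Dict.mk positions) "end" (-1), "--#end#--".toList)]
         : List (Int × List Char)).filter (fun pm => pm.1 != -1) := by
    cases hbs : (PySem.Dict.getD (PySem.Dict.mk positions) "start" (-1) != -1) <;>
    cases hba : (PySem.Dict.getD (PySem.Dict.mk positions) "answer" (-1) != -1) <;>
    cases hbe : (PySem.Dict.getD (PySem.Dict.mk positions) "end" (-1) != -1) <;>
      simp [List.filter_cons, hbs, hba, hbe, gA]
  rw [← hfil, sorted_map (gA (PySem.Dict.mk positions)) (fun pm => pm.1) true]
  have hk : (fun a : String × String => (gA (PySem.Dict.mk positions) a).1)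
      = (fun x : String × String => PySem.Dict.getD (PySem.Dict.mk positions) x.1 (-1)) := rfl
  rw [hk, List.foldl_map]
  rfl

/-- B's fold step on character lists. -/
def stepF (l : List Char) (st : Int × List (List Char)) (pm : Int × List Char) :
    Int × List (List Char) :=
  (max 0 (min pm.1 (l.length : Int)),
   st.2 ++ [PySem.List.slice l (some st.1) (some (max 0 (min pm.1 (l.length : Int)))), pm.2])

/-- The B-side element conversion. -/
def gB (pm : Int × String) : Int × List Char := (pm.1, pm.2.toList)

theorem bnorm (l : List Char) (items : List (Int × List Char)) :
    ∀ (st : Int × List (List Char)), 0 ≤ st.1 →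
    PySem.Chars.join [] ((items.foldl (stepF l) st).2
        ++ [PySem.List.slice l (some ((items.foldl (stepF l) st).1)) none])
      = PySem.Chars.join [] st.2 ++ segB l st.1.toNat items := by
  induction items with
  | nil =>
    intro st h0
    simp only [List.foldl_nil, segB]
    rw [PySem.List.slice_from _ h0]
    simp [joinNil]
  | cons pm rest ih =>
    intro st h0
    have hcut : (0 : Int) ≤ max 0 (min pm.1 (l.length : Int)) := le_max_left _ _
    rw [List.foldl_cons, ih (stepF l st pm) hcut]
    show PySem.Chars.join []
        (st.2 ++ [PySem.List.slice l (some st.1) (some (max 0 (min pm.1 (l.length : Int)))), pm.2])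
        ++ segB l (max 0 (min pm.1 (l.length : Int))).toNat rest
      = PySem.Chars.join [] st.2 ++ segB l st.1.toNat (pm :: rest)
    have hc : (max 0 (min pm.1 (l.length : Int))).toNat = clampN l.length pm.1 := rfl
    have hslice : PySem.List.slice l (some st.1) (some (max 0 (min pm.1 (l.length : Int))))
        = (l.take (clampN l.length pm.1)).drop st.1.toNat := by
      rw [PySem.List.slice_toNat _ h0 hcut, hc, List.drop_take]
    rw [hslice, hc]
    simp [joinNil, segB, List.append_assoc]

theorem stepB (t : String) (positions : List (String × Int)) :
    (add_markers_to_transcript_alt t positions).toList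
      = normB t.toList (PySem.Dict.getD (PySem.Dict.mk positions) "start" (-1))
          (PySem.Dict.getD (PySem.Dict.mk positions) "answer" (-1))
          (PySem.Dict.getD (PySem.Dict.mk positions) "end" (-1)) := by
  unfold add_markers_to_transcript_alt
  dsimp only
  rw [toList_ofList]
  have hbody : (fun (st : Int × List (List Char)) (pm : Int × String) =>
      (max 0 (min pm.1 (PySem.Str.len t)),
       st.2 ++ [PySem.List.slice t.toList (some st.1)
                  (some (max 0 (min pm.1 (PySem.Str.len t)))), pm.2.toList]))
      = (fun st pm => stepF t.toList st (gB pm)) := rfl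
  rw [hbody, ← List.foldl_map (f := gB) (g := stepF t.toList)]
  rw [bnorm t.toList _ ((0 : Int), ([] : List (List Char))) le_rfl]
  simp only [PySem.Chars.join_nil, List.nil_append, Int.toNat_zero]
  unfold normB
  have hk : (fun a : Int × String => (gB a).1) = (fun t : Int × String => t.1) := rfl
  rw [← hk, ← sorted_map gB (fun pm : Int × List Char => pm.1) false]
  congr 1
  cases hbs : (PySem.Dict.getD (PySem.Dict.mk positions) "start" (-1) != -1) <;>
  cases hba : (PySem.Dict.getD (PySem.Dict.mk positions) "answer" (-1) != -1) <;>
  cases hbe : (PySem.Dict.getD (PySem.Dict.mk positions) "end" (-1) != -1) <;>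
    simp [List.filter_cons, List.reverse_cons, hbs, hba, hbe, gB]

theorem Dred (t : String) (positions : List (String × Int)) :
    D_add_markers_to_transcript t positions ↔
      (((t.length : Int) < PySem.Dict.getD (PySem.Dict.mk positions) "start" (-1)
          ∧ (t.length : Int) < PySem.Dict.getD (PySem.Dict.mk positions) "answer" (-1))
        ∨ ((t.length : Int) < PySem.Dict.getD (PySem.Dict.mk positions) "start" (-1)
          ∧ (t.length : Int) < PySem.Dict.getD (PySem.Dict.mk positions) "end" (-1))
        ∨ ((t.length : Int) < PySem.Dict.getD (PySem.Dict.mk positions) "answer" (-1)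
          ∧ (t.length : Int) < PySem.Dict.getD (PySem.Dict.mk positions) "end" (-1))) := by
  unfold D_add_markers_to_transcript
  by_cases c1 : (t.length : Int) < PySem.Dict.getD (PySem.Dict.mk positions) "start" (-1) <;>
  by_cases c2 : (t.length : Int) < PySem.Dict.getD (PySem.Dict.mk positions) "answer" (-1) <;>
  by_cases c3 : (t.length : Int) < PySem.Dict.getD (PySem.Dict.mk positions) "end" (-1) <;>
    simp [List.filter_cons, c1, c2, c3] <;> omega

theorem insA_big (l : List Char) (p : Int) (m : List Char) (hp : (l.length : Int) < p) :
    insA l (p, m) = l ++ m := by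
  have hc : clampN l.length p = l.length := by unfold clampN; omega
  simp [insA, hc]

theorem insA_mid (x y : List Char) (p : Int) (m : List Char) (hp : (x.length : Int) < p) :
    insA (x ++ y) (p, m)
      = x ++ (y.take (clampN (x.length + y.length) p - x.length)
          ++ (m ++ y.drop (clampN (x.length + y.length) p - x.length))) := by
  have hc : x.length ≤ clampN (x.length + y.length) p := by unfold clampN; omega
  have hk : clampN (x.length + y.length) p
      = x.length + (clampN (x.length + y.length) p - x.length) := by omega
  unfold insA
  dsimp only
  rw [show (x ++ y).length = x.length + y.length from List.length_append, hk,
    List.take_append, List.drop_append]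
  have h1 : List.take (x.length + (clampN (x.length + y.length) p - x.length)) x = x :=
    List.take_of_length_le (by omega)
  have h2 : List.drop (x.length + (clampN (x.length + y.length) p - x.length)) x
      = ([] : List Char) :=
    List.drop_eq_nil_of_le (by omega)
  simp [h1, h2, List.append_assoc]

theorem segB_one_big (l : List Char) (p : Int) (m : List Char) (hp : (l.length : Int) < p) :
    segB l 0 [(p, m)] = l ++ m := by
  have hc : clampN l.length p = l.length := by unfold clampN; omega
  simp [segB, hc]

theorem segB_two_big (l : List Char) (rest : List (Int × List Char)) (pi pj : Int)
    (mi mj : List Char) (hi : (l.length : Int) < pi) (hj : (l.length : Int) < pj) :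
    segB l 0 (rest ++ [(pi, mi), (pj, mj)]) = segB l 0 rest ++ (mi ++ mj) := by
  have hci : clampN l.length pi = l.length := by unfold clampN; omega
  have hcj : clampN l.length pj = l.length := by unfold clampN; omega
  rw [show rest ++ [(pi, mi), (pj, mj)] = (rest ++ [(pi, mi)]) ++ [(pj, mj)] from by simp,
    ← segB_append l l.length le_rfl pj mj hcj (rest ++ [(pi, mi)]) 0
      (by intro pm _; unfold clampN; omega),
    List.take_length,
    ← segB_append l l.length le_rfl pi mi hci rest 0
      (by intro pm _; unfold clampN; omega),
    List.take_length]
  simp [List.drop_length, List.append_assoc]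

theorem NE_main (l : List Char) (rest : List (Int × List Char)) (pi pj : Int)
    (mi mj : List Char)
    (hrp : rest.Pairwise (fun a b => a.1 ≤ b.1))
    (hrl : ∀ pm ∈ rest, pm.1 ≤ (l.length : Int))
    (hi : (l.length : Int) < pi) (hj : (l.length : Int) < pj) (hmj : 1 ≤ mj.length)
    (hne : ∀ d : Nat, d ≤ mj.length → 1 ≤ d →
      mj.take d ++ (mi ++ mj.drop d) ≠ mi ++ mj) :
    List.foldl insA l (rest ++ [(pi, mi), (pj, mj)]).reverse
      ≠ segB l 0 (rest ++ [(pi, mi), (pj, mj)]) := by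
  intro hEq
  rw [show (rest ++ [(pi, mi), (pj, mj)]).reverse
        = (pj, mj) :: (pi, mi) :: rest.reverse from by simp,
    List.foldl_cons, List.foldl_cons, insA_big l pj mj hj,
    insA_mid l mj pi mi hi,
    foldl_insA_append rest.reverse l _ (by simpa using hrl),
    foldl_insA_rev_all_le rest l hrp hrl,
    segB_two_big l rest pi pj mi mj hi hj] at hEq
  have hd1 : 1 ≤ clampN (l.length + mj.length) pi - l.length := by unfold clampN; omega
  have hd2 : clampN (l.length + mj.length) pi - l.length ≤ mj.length := by unfold clampN; omega
  exact hne _ hd2 hd1 (List.append_cancel_left hEq)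

theorem NE3 (l : List Char) (ph pi pj : Int) (mh mi mj : List Char)
    (hh : (l.length : Int) < ph) (hi : (l.length : Int) < pi) (hj : (l.length : Int) < pj)
    (hmi : 1 ≤ mi.length) (hmj : 1 ≤ mj.length)
    (hne : ∀ d : Nat, d ≤ mj.length → ∀ e : Nat, e ≤ mi.length + mj.length →
      1 ≤ d → 1 ≤ e →
      (mj.take d ++ (mi ++ mj.drop d)).take e ++ (mh ++ (mj.take d ++ (mi ++ mj.drop d)).drop e)
        ≠ mh ++ (mi ++ mj)) :
    List.foldl insA l [(pj, mj), (pi, mi), (ph, mh)]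
      ≠ segB l 0 [(ph, mh), (pi, mi), (pj, mj)] := by
  intro hEq
  have hd2 : clampN (l.length + mj.length) pi - l.length ≤ mj.length := by unfold clampN; omega
  have hd1 : 1 ≤ clampN (l.length + mj.length) pi - l.length := by unfold clampN; omega
  set d := clampN (l.length + mj.length) pi - l.length with hd
  set X := mj.take d ++ (mi ++ mj.drop d) with hX
  have hXlen : X.length = mi.length + mj.length := by
    rw [hX]; simp; omega
  rw [List.foldl_cons, List.foldl_cons, List.foldl_cons, List.foldl_nil,
    insA_big l pj mj hj, insA_mid l mj pi mi hi, ← hd, ← hX,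
    insA_mid l X ph mh hh,
    show [(ph, mh), (pi, mi), (pj, mj)] = [(ph, mh)] ++ [(pi, mi), (pj, mj)] from rfl,
    segB_two_big l [(ph, mh)] pi pj mi mj hi hj,
    segB_one_big l ph mh hh] at hEq
  have he1 : 1 ≤ clampN (l.length + X.length) ph - l.length := by
    rw [hXlen]; unfold clampN; omega
  have he2 : clampN (l.length + X.length) ph - l.length ≤ mi.length + mj.length := by
    rw [hXlen]; unfold clampN; omega
  have hEq' := List.append_cancel_left (by simpa [List.append_assoc] using hEq :
    l ++ (X.take (clampN (l.length + X.length) ph - l.length)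
      ++ (mh ++ X.drop (clampN (l.length + X.length) ph - l.length))) = l ++ (mh ++ (mi ++ mj)))
  exact hne d hd2 _ he2 hd1 he1 hEq'

theorem neSort2 (l : List Char) (p q : Int) (mp mq : List Char)
    (hp : (l.length : Int) < p) (hq : (l.length : Int) < q)
    (hmp : 1 ≤ mp.length) (hmq : 1 ≤ mq.length)
    (hne1 : ∀ d : Nat, d ≤ mq.length → 1 ≤ d → mq.take d ++ (mp ++ mq.drop d) ≠ mp ++ mq)
    (hne2 : ∀ d : Nat, d ≤ mp.length → 1 ≤ d → mp.take d ++ (mq ++ mp.drop d) ≠ mq ++ mp) :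
    List.foldl insA l (PySem.List.sorted [(p, mp), (q, mq)] (fun pm => pm.1) true)
      ≠ segB l 0 (PySem.List.sorted [(q, mq), (p, mp)] (fun pm => pm.1) false) := by
  by_cases h : p < q
  · have := NE_main l [] p q mp mq (by simp) (by simp) hp hq hmq hne1
    simpa [PySem.List.sorted, PySem.List.insertBy, h] using this
  · have := NE_main l [] q p mq mp (by simp) (by simp) hq hp hmp hne2
    simpa [PySem.List.sorted, PySem.List.insertBy, h] using this

theorem neSort3 (l : List Char) (vs va ve : Int)
    (hD : ((l.length : Int) < vs ∧ (l.length : Int) < va)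
        ∨ ((l.length : Int) < vs ∧ (l.length : Int) < ve)
        ∨ ((l.length : Int) < va ∧ (l.length : Int) < ve)) :
    List.foldl insA l
        (PySem.List.sorted [(vs, "--#start#--".toList), (va, "--#answer#--".toList),
          (ve, "--#end#--".toList)] (fun pm => pm.1) true)
      ≠ segB l 0
        (PySem.List.sorted [(ve, "--#end#--".toList), (va, "--#answer#--".toList),
          (vs, "--#start#--".toList)] (fun pm => pm.1) false) := by
  by_cases h1 : vs < va <;> by_cases h2 : va < ve <;> by_cases h3 : vs < ve <;>
    simp only [PySem.List.sorted, PySem.List.insertBy, List.foldl_cons, List.foldl_nil,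
      h1, h2, h3, decide_true, decide_false, Bool.false_eq_true, decide_eq_true_eq,
      eq_self_iff_true, not_false_eq_true, reduceIte]
  -- (h1, h2, h3): asc [s, a, e]
  · by_cases hb : (l.length : Int) < vs
    · have := NE3 l vs va ve "--#start#--".toList "--#answer#--".toList "--#end#--".toList
        hb (by omega) (by omega) (by decide) (by decide) (by decide)
      simpa using this
    · have := NE_main l [(vs, "--#start#--".toList)] va ve
        "--#answer#--".toList "--#end#--".toList (by simp) (by simp; omega)
        (by omega) (by omega) (by decide) (by decide)
      simpa using this
  -- (h1, h2, ¬h3): contradiction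
  · omega
  -- (h1, ¬h2, h3): asc [s, e, a]
  · by_cases hb : (l.length : Int) < vs
    · have := NE3 l vs ve va "--#start#--".toList "--#end#--".toList "--#answer#--".toList
        hb (by omega) (by omega) (by decide) (by decide) (by decide)
      simpa using this
    · have := NE_main l [(vs, "--#start#--".toList)] ve va
        "--#end#--".toList "--#answer#--".toList (by simp) (by simp; omega)
        (by omega) (by omega) (by decide) (by decide)
      simpa using this
  -- (h1, ¬h2, ¬h3): asc [e, s, a]
  · by_cases hb : (l.length : Int) < ve
    · have := NE3 l ve vs va "--#end#--".toList "--#start#--".toList "--#answer#--".toList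
        hb (by omega) (by omega) (by decide) (by decide) (by decide)
      simpa using this
    · have := NE_main l [(ve, "--#end#--".toList)] vs va
        "--#start#--".toList "--#answer#--".toList (by simp) (by simp; omega)
        (by omega) (by omega) (by decide) (by decide)
      simpa using this
  -- (¬h1, h2, h3): asc [a, s, e]
  · by_cases hb : (l.length : Int) < va
    · have := NE3 l va vs ve "--#answer#--".toList "--#start#--".toList "--#end#--".toList
        hb (by omega) (by omega) (by decide) (by decide) (by decide)
      simpa using this
    · have := NE_main l [(va, "--#answer#--".toList)] vs ve
        "--#start#--".toList "--#end#--".toList (by simp) (by simp; omega)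
        (by omega) (by omega) (by decide) (by decide)
      simpa using this
  -- (¬h1, h2, ¬h3): asc [a, e, s]
  · by_cases hb : (l.length : Int) < va
    · have := NE3 l va ve vs "--#answer#--".toList "--#end#--".toList "--#start#--".toList
        hb (by omega) (by omega) (by decide) (by decide) (by decide)
      simpa using this
    · have := NE_main l [(va, "--#answer#--".toList)] ve vs
        "--#end#--".toList "--#start#--".toList (by simp) (by simp; omega)
        (by omega) (by omega) (by decide) (by decide)
      simpa using this
  -- (¬h1, ¬h2, h3): contradiction
  · omega
  -- (¬h1, ¬h2, ¬h3): asc [e, a, s]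
  · by_cases hb : (l.length : Int) < ve
    · have := NE3 l ve va vs "--#end#--".toList "--#answer#--".toList "--#start#--".toList
        hb (by omega) (by omega) (by decide) (by decide) (by decide)
      simpa using this
    · have := NE_main l [(ve, "--#end#--".toList)] va vs
        "--#answer#--".toList "--#start#--".toList (by simp) (by simp; omega)
        (by omega) (by omega) (by decide) (by decide)
      simpa using this

set_option maxHeartbeats 1600000 in
theorem coreNe (l : List Char) (vs va ve : Int)
    (hD : ((l.length : Int) < vs ∧ (l.length : Int) < va)
        ∨ ((l.length : Int) < vs ∧ (l.length : Int) < ve)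
        ∨ ((l.length : Int) < va ∧ (l.length : Int) < ve)) :
    normA l vs va ve ≠ normB l vs va ve := by
  unfold normA normB
  by_cases hs : vs = -1 <;> by_cases ha : va = -1 <;> by_cases he : ve = -1 <;>
    simp only [hs, ha, he, List.filter_cons, List.filter_nil, bne_self_eq_false,
      Bool.false_eq_true, if_false, bne_iff_ne, ne_eq, not_false_eq_true, if_true] <;>
    first
      | omega
      | exact neSort2 l _ _ _ _ (by omega) (by omega) (by decide) (by decide)
          (by decide) (by decide)
      | exact neSort3 l _ _ _ (by omega)

-- ===== VERDICT (by name: the statement is the Claim_ definition above) =====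
theorem add_markers_to_transcript_spec : Claim_unchanged_add_markers_to_transcript := by
  intro t positions _ hnD
  rw [Dred] at hnD
  simp only [not_or] at hnD
  obtain ⟨h1, h2, h3⟩ := hnD
  have hl : ((t.toList.length : Nat) : Int) = (t.length : Int) := by simp
  have hToList : (add_markers_to_transcript t positions).toList
      = (add_markers_to_transcript_alt t positions).toList := by
    rw [stepA t positions, stepB t positions]
    refine coreAB t.toList _ _ _ ?_ ?_ ?_ <;> rw [hl] <;> assumption
  have := congrArg String.ofList hToList
  simpa using this

theorem add_markers_to_transcript_changed : Claim_changed_add_markers_to_transcript := by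
  unfold Claim_changed_add_markers_to_transcript
  refine ⟨by decide, by decide, by decide, by decide, by decide⟩

theorem add_markers_to_transcript_tight : Claim_exact_add_markers_to_transcript := by
  intro t positions _ hD hEq
  have hTL := congrArg String.toList hEq
  rw [stepA t positions, stepB t positions] at hTL
  rw [Dred] at hD
  have hl : ((t.toList.length : Nat) : Int) = (t.length : Int) := by simp
  exact coreNe t.toList _ _ _ (by rw [hl]; exact hD) hTL
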